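-- pv_equiv track=rewrite | github.com/S-Christensen/cartographersStudy | backend/scoringCards.py | ulemswallow
-- ===== SOURCE A (Python) =====
-- def ulemswallow(grid):
--     def is_Farm(r, c):
--         return 0 <= r < len(grid) and 0 <= c < len(grid[0]) and grid[r][c] == "Farm"
--
--     def count_adjacent_Farms(r, c):
--         Farm_count = 0
--         for dr, dc in [(-1, 0), (1, 0), (0, -1), (0, 1)]:
--             nr, nc = r + dr, c + dc
--             if is_Farm(nr, nc):
--                 Farm_count += 1
--         return Farm_count
--
--     Water_count = 0
--
--     for r in range(len(grid)):
--         for c in range(len(grid[0])):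
--             if grid[r][c] == "Water" and count_adjacent_Farms(r, c) >= 2:
--                 Water_count += 1
--
--     return Water_count*4
-- ===== SOURCE B (Python) =====
-- def ulemswallow(grid):
--     counts = {}
--     for r in range(len(grid)):
--         for c in range(len(grid[0])):
--             if grid[r][c] == "Farm":
--                 for nr, nc in ((r - 1, c), (r + 1, c), (r, c - 1), (r, c + 1)):
--                     if 0 <= nr < len(grid) and 0 <= nc < len(grid[0]) and grid[nr][nc] == "Water":
--                         counts[(nr, nc)] = counts.get((nr, nc), 0) + 1
--     return 4 * sum(1 for v in counts.values() if v >= 2)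
-- ===== Notes on version B (the rewrite author's own statement) =====
-- stated objective: alternative
-- what changed: Inverts the per-Water-cell neighbor gather into a scatter: one pass over the grid increments a dict entry for each in-bounds Water neighbor of every Farm cell, then returns 4 times the number of dict values >= 2 (no per-cell neighbor re-scan).
import Mathlib
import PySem

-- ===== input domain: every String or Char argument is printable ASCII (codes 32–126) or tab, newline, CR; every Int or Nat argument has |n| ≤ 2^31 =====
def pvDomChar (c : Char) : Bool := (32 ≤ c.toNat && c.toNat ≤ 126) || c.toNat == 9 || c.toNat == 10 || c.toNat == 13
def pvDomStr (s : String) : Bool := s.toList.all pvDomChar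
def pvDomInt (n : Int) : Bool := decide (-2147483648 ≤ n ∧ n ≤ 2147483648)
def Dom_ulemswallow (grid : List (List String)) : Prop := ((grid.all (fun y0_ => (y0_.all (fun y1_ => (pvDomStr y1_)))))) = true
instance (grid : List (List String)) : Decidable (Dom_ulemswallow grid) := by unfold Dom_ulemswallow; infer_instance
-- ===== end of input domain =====

-- B replaces A's per-Water-cell neighbour gather by a single scatter pass that increments a
-- dict entry for each in-bounds Water neighbour of every Farm cell (objective: alternative).

-- ===== PORT A =====
-- grid[r][c] (raising accesses are excluded by Pre_; out of range defaults to "")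
def pvCell (grid : List (List String)) (r c : Int) : String :=
  (PySem.List.pyGet? ((PySem.List.pyGet? grid r).getD []) c).getD ""

def pvOffs : List (Int × Int) := [(-1, 0), (1, 0), (0, -1), (0, 1)]

def pvIsFarm (grid : List (List String)) (r c : Int) : Bool :=
  decide (0 ≤ r) && decide (r < (grid.length : Int)) &&
  decide (0 ≤ c) && decide (c < ((grid.headD []).length : Int)) &&
  (pvCell grid r c == "Farm")

def pvCountAdjFarms (grid : List (List String)) (r c : Int) : Int :=
  pvOffs.foldl (fun acc d => if pvIsFarm grid (r + d.1) (c + d.2) then acc + 1 else acc) 0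

def ulemswallow (grid : List (List String)) : Int :=
  ((List.range grid.length).foldl (fun (acc : Int) (r : Nat) =>
    (List.range (grid.headD []).length).foldl (fun (acc : Int) (c : Nat) =>
      if pvCell grid (r : Int) (c : Int) == "Water" ∧ pvCountAdjFarms grid (r : Int) (c : Int) ≥ 2
      then acc + 1 else acc) acc) 0) * 4

-- ===== PORT B =====
def pvIsWater (grid : List (List String)) (r c : Int) : Bool :=
  decide (0 ≤ r) && decide (r < (grid.length : Int)) &&
  decide (0 ≤ c) && decide (c < ((grid.headD []).length : Int)) &&
  (pvCell grid r c == "Water")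

def pvNbrs (r c : Int) : List (Int × Int) := [(r - 1, c), (r + 1, c), (r, c - 1), (r, c + 1)]

def ulemswallow_alt (grid : List (List String)) : Int :=
  let counts : PySem.Dict (Int × Int) Int :=
    (List.range grid.length).foldl (fun (d : PySem.Dict (Int × Int) Int) (r : Nat) =>
      (List.range (grid.headD []).length).foldl (fun (d : PySem.Dict (Int × Int) Int) (c : Nat) =>
        if pvCell grid (r : Int) (c : Int) == "Farm" then
          (pvNbrs (r : Int) (c : Int)).foldl (fun d p =>
            if pvIsWater grid p.1 p.2 then d.insert p (d.getD p 0 + 1) else d) d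
        else d) d) PySem.Dict.empty
  4 * counts.values.foldl (fun acc v => if v ≥ 2 then acc + 1 else acc) 0

-- ===== PRECONDITION & SPEC =====
-- Pre_ excludes exactly the ragged grids on which Python A raises IndexError: some row is
-- shorter than row 0 (every such missing cell is visited by A's main loop).
def Pre_ulemswallow (grid : List (List String)) : Prop :=
  ∀ row ∈ grid, (grid.headD []).length ≤ row.length
instance (grid : List (List String)) : Decidable (Pre_ulemswallow grid) := by
  unfold Pre_ulemswallow; infer_instance

def pvWitness_ulemswallow : List (List String) :=
  [["Water", "Farm"], ["Farm", "Forest"]]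

def Spec_ulemswallow (grid : List (List String)) (out : Int) : Prop := out = ulemswallow_alt grid
instance (grid : List (List String)) (out : Int) : Decidable (Spec_ulemswallow grid out) := by
  unfold Spec_ulemswallow; infer_instance

-- ===== CLAIM (what is proved, stated in full; the proofs are below) =====
def Claim_equal_ulemswallow : Prop :=
  ∀ (grid : List (List String)), Dom_ulemswallow grid → Pre_ulemswallow grid →
    Spec_ulemswallow grid (ulemswallow grid)

-- ===== LEMMAS AND PROOFS =====

-- all in-bounds coordinates, row-major (the traversal order of both ports)
def pvCells (grid : List (List String)) : List (Int × Int) :=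
  (List.range grid.length).flatMap (fun (r : Nat) =>
    (List.range (grid.headD []).length).map (fun (c : Nat) => ((r : Int), (c : Int))))

-- the flat multiset of scatter targets of B: one entry per (Farm cell, in-bounds Water neighbour)
def pvK (grid : List (List String)) : List (Int × Int) :=
  ((pvCells grid).filter (fun p => pvCell grid p.1 p.2 == "Farm")).flatMap
    (fun p => (pvNbrs p.1 p.2).filter (fun q => pvIsWater grid q.1 q.2))

lemma mem_pvCells {grid : List (List String)} {p : Int × Int} :
    p ∈ pvCells grid ↔
      0 ≤ p.1 ∧ p.1 < (grid.length : Int) ∧ 0 ≤ p.2 ∧ p.2 < ((grid.headD []).length : Int) := by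
  constructor
  · intro hp
    rw [pvCells, List.mem_flatMap] at hp
    obtain ⟨r, hr, hp⟩ := hp
    rw [List.mem_map] at hp
    obtain ⟨c, hc, rfl⟩ := hp
    rw [List.mem_range] at hr
    rw [List.mem_range] at hc
    refine ⟨?_, ?_, ?_, ?_⟩ <;> dsimp only <;> omega
  · rintro ⟨h1, h2, h3, h4⟩
    rw [pvCells, List.mem_flatMap]
    refine ⟨p.1.toNat, List.mem_range.mpr (by omega), ?_⟩
    rw [List.mem_map]
    refine ⟨p.2.toNat, List.mem_range.mpr (by omega), ?_⟩
    apply Prod.ext <;> dsimp only <;> omega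

lemma nodup_pvCells (grid : List (List String)) : (pvCells grid).Nodup := by
  rw [pvCells, List.nodup_flatMap]
  constructor
  · intro r _
    apply List.Nodup.map
    · intro a b hab
      simpa using hab
    · exact List.nodup_range
  · apply List.Pairwise.imp ?_ List.pairwise_lt_range
    intro r r' hlt
    intro x hx hx'
    rw [List.mem_map] at hx hx'
    obtain ⟨c, _, rfl⟩ := hx
    obtain ⟨c', _, he⟩ := hx'
    rw [Prod.ext_iff] at he
    dsimp only at he
    omega

lemma nodup_pvNbrs (r c : Int) : (pvNbrs r c).Nodup := by
  simp [pvNbrs, Prod.ext_iff]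
  omega

lemma mem_pvNbrs_comm {p q : Int × Int} : p ∈ pvNbrs q.1 q.2 ↔ q ∈ pvNbrs p.1 p.2 := by
  simp only [pvNbrs, List.mem_cons, List.not_mem_nil, or_false, Prod.ext_iff]
  omega

-- double counting: members of l₂ inside l₁ = members of l₁ inside l₂, for nodup lists
lemma countP_mem_comm {l₁ l₂ : List (Int × Int)} (h₁ : l₁.Nodup) (h₂ : l₂.Nodup) :
    l₁.countP (fun x => decide (x ∈ l₂)) = l₂.countP (fun x => decide (x ∈ l₁)) := by
  rw [List.countP_eq_length_filter, List.countP_eq_length_filter,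
    ← List.toFinset_card_of_nodup (h₁.filter _), ← List.toFinset_card_of_nodup (h₂.filter _),
    List.toFinset_filter, List.toFinset_filter]
  have e1 : {x ∈ l₁.toFinset | decide (x ∈ l₂) = true} = l₁.toFinset ∩ l₂.toFinset := by
    ext x; simp
  have e2 : {x ∈ l₂.toFinset | decide (x ∈ l₁) = true} = l₂.toFinset ∩ l₁.toFinset := by
    ext x; simp
  rw [e1, e2, Finset.inter_comm]

lemma sum_indicator_eq_countP {α : Type} (p : α → Bool) (l : List α) :
    (l.map (fun x => if p x = true then (1 : ℕ) else 0)).sum = l.countP p := by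
  induction l with
  | nil => simp
  | cons a t ih => by_cases h : p a = true <;> simp [List.countP_cons, h, ih] <;> omega

lemma pvNbrs_eq_map_offs (r c : Int) :
    pvNbrs r c = pvOffs.map (fun d => (r + d.1, c + d.2)) := by
  simp [pvOffs, pvNbrs, sub_eq_add_neg]

lemma cells_countP (grid : List (List String)) (q : Int × Int → Bool) :
    (pvCells grid).countP q =
      ((List.range grid.length).map (fun (r : Nat) =>
        (List.range (grid.headD []).length).countP (fun (c : Nat) => q ((r : Int), (c : Int))))).sum := by
  rw [pvCells, List.countP_flatMap]
  apply congrArg List.sum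
  apply List.map_congr_left
  intro r _
  simp [Function.comp_def, List.countP_map]

-- A as a closed count over the cell list
lemma ulemswallow_eq_countP (grid : List (List String)) :
    ulemswallow grid =
      (((pvCells grid).countP (fun p =>
        decide (pvCell grid p.1 p.2 == "Water" ∧ pvCountAdjFarms grid p.1 p.2 ≥ 2))) : Int) * 4 := by
  unfold ulemswallow
  simp only [PySem.List.foldl_ite_add_one, PySem.List.foldl_add, zero_add]
  rw [cells_countP grid _, Nat.cast_list_sum, List.map_map]
  congr 1

-- the gather count, as a Nat countP over the neighbour list
lemma countAdjFarms_eq (grid : List (List String)) (r c : Int) :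
    pvCountAdjFarms grid r c =
      (((pvNbrs r c).countP (fun q => pvIsFarm grid q.1 q.2)) : Int) := by
  unfold pvCountAdjFarms
  rw [show (fun (acc : Int) (d : Int × Int) => if pvIsFarm grid (r + d.1) (c + d.2) then acc + 1 else acc) =
    (fun acc d => if (fun d : Int × Int => pvIsFarm grid (r + d.1) (c + d.2)) d = true then acc + 1 else acc) from rfl]
  rw [PySem.List.foldl_if_add_one, zero_add, pvNbrs_eq_map_offs, List.countP_map]
  rfl

-- the flattened form of B's scatter loop
lemma pvK_eq_flat (grid : List (List String)) :
    pvK grid = (List.range grid.length).flatMap (fun (r : Nat) =>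
      ((List.range (grid.headD []).length).filter
        (fun (c : Nat) => pvCell grid (r : Int) (c : Int) == "Farm")).flatMap
        (fun (c : Nat) => (pvNbrs (r : Int) (c : Int)).filter (fun q => pvIsWater grid q.1 q.2))) := by
  rw [pvK, pvCells, List.filter_flatMap, List.flatMap_assoc]
  apply congrArg (fun t => List.flatMap t (List.range grid.length))
  funext r
  rw [List.filter_map, List.flatMap_map]
  simp [Function.comp_def]

-- B's dict is the counter of the flat scatter list
lemma alt_counts_eq_counter (grid : List (List String)) :
    ulemswallow_alt grid =
      4 * (((PySem.Dict.counter (pvK grid)).values.countP (fun v => decide (v ≥ 2))) : Int) := by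
  unfold ulemswallow_alt
  simp only [PySem.List.foldl_if_eq_foldl_filter, ← List.foldl_flatMap,
    PySem.Dict.foldl_insert_getD_add_one_eq_counter, PySem.List.foldl_ite_add_one, zero_add,
    ← pvK_eq_flat]

-- every scatter target is an in-bounds Water cell
lemma mem_pvK_water {grid : List (List String)} {k : Int × Int} (h : k ∈ pvK grid) :
    pvIsWater grid k.1 k.2 = true := by
  simp only [pvK, List.mem_flatMap, List.mem_filter] at h
  obtain ⟨p, _, hk, hw⟩ := h
  exact hw

-- scatter/gather: the multiplicity of a Water cell in pvK is its number of Farm neighbours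
lemma count_pvK (grid : List (List String)) {k : Int × Int}
    (hw : pvIsWater grid k.1 k.2 = true) :
    List.count k (pvK grid) = (pvNbrs k.1 k.2).countP (fun q => pvIsFarm grid q.1 q.2) := by
  unfold pvK
  rw [List.count_flatMap]
  have hterm : ∀ p ∈ (pvCells grid).filter (fun p => pvCell grid p.1 p.2 == "Farm"),
      List.count k ((pvNbrs p.1 p.2).filter (fun q => pvIsWater grid q.1 q.2)) =
        if decide (p ∈ pvNbrs k.1 k.2) = true then (1 : ℕ) else 0 := by
    intro p _
    rw [List.count_filter (p := fun q : Int × Int => pvIsWater grid q.1 q.2) (a := k) hw]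
    by_cases hm : k ∈ pvNbrs p.1 p.2
    · rw [List.count_eq_one_of_mem (nodup_pvNbrs _ _) hm]
      simp [mem_pvNbrs_comm.mp hm]
    · rw [List.count_eq_zero.mpr hm]
      have hpm : p ∉ pvNbrs k.1 k.2 := fun h => hm (mem_pvNbrs_comm.mpr h)
      simp [hpm]
  simp only [Function.comp_def]
  rw [List.map_congr_left hterm, sum_indicator_eq_countP]
  rw [countP_mem_comm
    ((nodup_pvCells grid).filter (fun p => pvCell grid p.1 p.2 == "Farm"))
    (nodup_pvNbrs k.1 k.2)]
  apply List.countP_congr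
  intro q hq
  simp only [List.mem_filter, mem_pvCells, decide_eq_true_eq, pvIsFarm]
  constructor
  · rintro ⟨⟨b1, b2, b3, b4⟩, hf⟩
    simp only [Bool.and_eq_true, decide_eq_true_eq]
    exact ⟨⟨⟨⟨b1, b2⟩, b3⟩, b4⟩, hf⟩
  · intro hf
    simp only [Bool.and_eq_true, decide_eq_true_eq] at hf
    exact ⟨⟨hf.1.1.1.1, hf.1.1.1.2, hf.1.1.2, hf.1.2⟩, hf.2⟩

-- the central count identity between A's gather and B's scatter
lemma core_count (grid : List (List String)) :
    (PySem.Set.ofList (pvK grid)).countP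
        (fun k => decide ((List.count k (pvK grid) : Int) ≥ 2)) =
      (pvCells grid).countP (fun p =>
        decide (pvCell grid p.1 p.2 == "Water" ∧ pvCountAdjFarms grid p.1 p.2 ≥ 2)) := by
  rw [List.countP_eq_length_filter, List.countP_eq_length_filter]
  apply List.Perm.length_eq
  apply (List.perm_ext_iff_of_nodup ((PySem.Set.nodup_ofList _).filter _)
    ((nodup_pvCells grid).filter _)).2
  intro k
  simp only [List.mem_filter, PySem.Set.mem_ofList, decide_eq_true_eq]
  constructor
  · rintro ⟨hk, hc⟩
    have hw := mem_pvK_water hk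
    have hwb : (0 ≤ k.1 ∧ k.1 < (grid.length : Int) ∧ 0 ≤ k.2 ∧
        k.2 < ((grid.headD []).length : Int)) ∧ pvCell grid k.1 k.2 == "Water" := by
      simpa [pvIsWater, and_assoc] using hw
    refine ⟨mem_pvCells.2 hwb.1, hwb.2, ?_⟩
    rw [countAdjFarms_eq, ← count_pvK grid hw]
    exact hc
  · rintro ⟨hc, hwat, hge⟩
    have hb := mem_pvCells.1 hc
    have hw : pvIsWater grid k.1 k.2 = true := by
      unfold pvIsWater
      simp only [Bool.and_eq_true, decide_eq_true_eq]
      exact ⟨⟨⟨⟨hb.1, hb.2.1⟩, hb.2.2.1⟩, hb.2.2.2⟩, hwat⟩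
    rw [countAdjFarms_eq, ← count_pvK grid hw] at hge
    have hpos : 0 < List.count k (pvK grid) := by omega
    exact ⟨List.count_pos_iff.mp hpos, hge⟩

-- ===== VERDICT (by name: the statement is the Claim_ definition above) =====
theorem ulemswallow_spec : Claim_equal_ulemswallow := by
  intro grid _ _
  unfold Spec_ulemswallow
  rw [ulemswallow_eq_countP, alt_counts_eq_counter]
  have hv : (PySem.Dict.counter (pvK grid)).values =
      (PySem.Set.ofList (pvK grid)).map (fun k => ((List.count k (pvK grid)) : Int)) := by
    show (PySem.Dict.counter (pvK grid)).items.map Prod.snd = _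
    rw [PySem.Dict.items_counter, List.map_map]
    rfl
  rw [hv, List.countP_map]
  have hp : ((fun v => decide (v ≥ 2)) ∘ fun k => ((List.count k (pvK grid)) : Int)) =
      (fun k => decide ((List.count k (pvK grid) : Int) ≥ 2)) := rfl
  rw [hp, core_count grid]
  ring
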